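-- pv_equiv track=rewrite | github.com/KULeuven-COSIC/asic_jitter_measure | measurements/read_asic_2021_1.py | _remove_escape
-- ===== SOURCE A (Python) =====
-- from typing import Optional, Union, List, Tuple
--
-- def _remove_escape(bys: List[int]) -> List[int]:
--     if len(bys) < 1:
--         return bys
--     result = [bys[0]]
--     i = 1
--     while i < len(bys):
--         if bys[i] == 1:
--             i += 2
--             if i - 1 < len(bys):
--                 result.append(bys[i-1])
--             continue
--         result.append(bys[i])
--         i += 1
--     return result
-- ===== SOURCE B (Python) =====
-- from typing import List
--
-- def _remove_escape(bys: List[int]) -> List[int]: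
--     if len(bys) < 1:
--         return bys
--     # Stage 1: run-length encode the tail.
--     runs = []
--     for b in bys[1:]:
--         if runs and runs[-1][0] == b:
--             runs[-1][1] += 1
--         else:
--             runs.append([b, 1])
--     # Stage 2: expand runs; a run of k escape bytes (value 1) pairs up into k//2
--     # literal 1s (an odd leftover escapes the following non-1 byte, which is
--     # emitted identically, or is dropped at end of input).
--     out = [bys[0]]
--     for val, n in runs:
--         out.extend([val] * (n // 2 if val == 1 else n))
--     return out
-- ===== Notes on version B (the rewrite author's own statement) =====
-- stated objective: alternative
-- what changed: Replaced A's index-skipping scan (i += 2 on an escape byte with a bounds re-check) by a two-stage pipeline: run-length encode the tail, then expand the runs with each run of k escape bytes (value 1) collapsed to k//2 literal ones.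
import Mathlib
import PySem

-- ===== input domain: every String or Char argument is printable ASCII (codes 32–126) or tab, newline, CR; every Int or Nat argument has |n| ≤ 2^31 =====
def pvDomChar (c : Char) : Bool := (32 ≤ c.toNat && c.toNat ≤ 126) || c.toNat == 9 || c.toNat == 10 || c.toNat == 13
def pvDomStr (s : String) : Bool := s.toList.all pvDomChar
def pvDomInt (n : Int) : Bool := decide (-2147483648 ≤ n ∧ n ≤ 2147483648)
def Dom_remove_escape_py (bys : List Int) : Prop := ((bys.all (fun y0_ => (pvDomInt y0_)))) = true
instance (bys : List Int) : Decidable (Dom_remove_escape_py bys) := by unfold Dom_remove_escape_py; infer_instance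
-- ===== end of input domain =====

-- B replaces A's index-skipping scan (i += 2 with a bounds re-check) by a two-stage
-- pipeline: run-length encode the tail, then expand each run, halving runs of the
-- escape byte 1; same O(n) cost, same return value.

-- ===== PORT A =====
-- A's while loop over index i, transcribed as recursion on the remaining suffix bys[i:]:
-- 'bys[i] == 1' consumes two elements (appending the second only if it exists), else one.
def removeEscapeLoopA (acc : List Int) : List Int → List Int
  | [] => acc
  | b :: rest =>
    if b = 1 then
      match rest with
      | [] => acc                                   -- i-1 ≥ len: nothing appended
      | x :: rest' => removeEscapeLoopA (acc ++ [x]) rest'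
    else removeEscapeLoopA (acc ++ [b]) rest

def remove_escape_py (bys : List Int) : List Int :=
  match bys with
  | [] => []                                        -- len(bys) < 1: return bys
  | b0 :: rest => removeEscapeLoopA [b0] rest

-- ===== PORT B =====
-- Stage 1 of Source B: run-length encoding loop over bys[1:] ('runs[-1][1] += 1' becomes
-- dropLast ++ updated last element).
def rleStep (runs : List (Int × Int)) (b : Int) : List (Int × Int) :=
  match runs.getLast? with
  | some (v, n) => if v = b then runs.dropLast ++ [(v, n + 1)] else runs ++ [(b, 1)]
  | none => runs ++ [(b, 1)]

-- Stage 2 of Source B: '[val] * (n // 2 if val == 1 else n)'.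
def emitRun (p : Int × Int) : List Int :=
  if p.1 = 1 then List.replicate (PySem.Int.floordiv p.2 2).toNat 1
  else List.replicate p.2.toNat p.1

def remove_escape_py_alt (bys : List Int) : List Int :=
  match bys with
  | [] => []
  | b0 :: _rest =>
    (bys.tail.foldl rleStep []).foldl (fun out p => out ++ emitRun p) [b0]

-- ===== PRECONDITION & SPEC =====
def Spec_remove_escape_py (bys : List Int) (out : List Int) : Prop := out = remove_escape_py_alt bys
instance (bys : List Int) (out : List Int) : Decidable (Spec_remove_escape_py bys out) := by unfold Spec_remove_escape_py; infer_instance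

-- ===== CLAIM (what is proved, stated in full; the proofs are below) =====
def Claim_equal_remove_escape_py : Prop := ∀ (bys : List Int), Dom_remove_escape_py bys → Spec_remove_escape_py bys (remove_escape_py bys)

-- ===== LEMMAS AND PROOFS =====

-- The common specification: unescape a tail, consuming '1, x' pairs.
def fspec : List Int → List Int
  | [] => []
  | [b] => if b = 1 then [] else [b]
  | b :: c :: r => if b = 1 then c :: fspec r else b :: fspec (c :: r)

-- A's loop computes acc ++ fspec.
theorem loopA_nil (acc : List Int) : removeEscapeLoopA acc [] = acc := rfl

theorem loopA_eq_fspec (acc rest : List Int) :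
    removeEscapeLoopA acc rest = acc ++ fspec rest := by
  induction acc, rest using removeEscapeLoopA.induct with
  | case1 acc => simp [loopA_nil, fspec]
  | case2 acc => simp [removeEscapeLoopA, fspec]
  | case3 acc x rest' ih =>
    simp [removeEscapeLoopA, fspec, ih]
  | case4 acc b rest hb ih =>
    rw [removeEscapeLoopA.eq_def]
    cases rest with
    | nil => simp [hb, fspec, loopA_nil]
    | cons c r => simp [hb, fspec, ih]

-- The pending run (v, n) followed by the yet-unencoded suffix t, expanded.
def pendK (v : Int) (n : Int) : List Int → List Int
  | [] => emitRun (v, n)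
  | b :: t => if b = v then pendK v (n + 1) t else emitRun (v, n) ++ pendK b 1 t

theorem rleStep_concat_eq (runs : List (Int × Int)) (v n : Int) :
    rleStep (runs ++ [(v, n)]) v = runs ++ [(v, n + 1)] := by
  simp [rleStep]

theorem rleStep_concat_ne (runs : List (Int × Int)) (v n b : Int) (h : ¬ v = b) :
    rleStep (runs ++ [(v, n)]) b = (runs ++ [(v, n)]) ++ [(b, 1)] := by
  simp [rleStep, h, List.append_assoc]

-- Folding rleStep from a state whose last run is (v, n) expands to pendK.
theorem fold_rle_pend (t : List Int) :
    ∀ (runs : List (Int × Int)) (v n : Int),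
      (List.foldl rleStep (runs ++ [(v, n)]) t).flatMap emitRun
        = runs.flatMap emitRun ++ pendK v n t := by
  induction t with
  | nil => intro runs v n; simp [pendK]
  | cons b t ih =>
    intro runs v n
    by_cases hb : b = v
    · subst hb
      rw [List.foldl_cons, rleStep_concat_eq, ih runs b (n + 1), pendK, if_pos rfl]
    · rw [List.foldl_cons, rleStep_concat_ne runs v n b (fun h => hb h.symm),
        ih (runs ++ [(v, n)]) b 1, pendK, if_neg hb]
      simp [List.append_assoc]

theorem floordiv_two_toNat (n : Int) (hn : 0 ≤ n) :
    (PySem.Int.floordiv n 2).toNat = n.toNat / 2 := by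
  rw [PySem.Int.floordiv_eq_ediv_of_pos (by omega)]
  omega

-- fspec passes unchanged through a block of non-escape bytes.
theorem fspec_replicate_ne (v : Int) (hv : v ≠ 1) (m : Nat) (t : List Int) :
    fspec (List.replicate m v ++ t) = List.replicate m v ++ fspec t := by
  induction m with
  | zero => simp
  | succ k ih =>
    rw [List.replicate_succ, List.cons_append]
    cases hk : List.replicate k v ++ t with
    | nil => simp at hk; simp [hk, fspec, hv]
    | cons c r =>
      rw [fspec, if_neg hv, ← hk, ih]
      simp

-- fspec halves a maximal block of escape bytes (t does not start with 1).
theorem fspec_replicate_one (m : Nat) (t : List Int) (ht : t.head? ≠ some 1) :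
    fspec (List.replicate m (1 : Int) ++ t) = List.replicate (m / 2) 1 ++ fspec t := by
  induction m using Nat.twoStepInduction with
  | zero => simp
  | one =>
    cases t with
    | nil => simp [fspec]
    | cons c r =>
      have hc : c ≠ 1 := by simpa using ht
      simp only [List.replicate_succ, List.replicate_zero, List.nil_append, List.cons_append]
      rw [fspec, if_pos rfl]
      cases r with
      | nil => simp [fspec, hc]
      | cons d s => simp [fspec, hc]
  | more k ih _ =>
    have hdiv : (k + 2) / 2 = k / 2 + 1 := by omega
    rw [hdiv, List.replicate_succ (n := k + 1), List.replicate_succ (n := k),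
      List.cons_append, List.cons_append, fspec, if_pos rfl, ih,
      List.replicate_succ, List.cons_append]

-- pendK is fspec of the pending run's expansion followed by the suffix.
theorem pendK_eq_fspec (t : List Int) :
    ∀ (v n : Int), 1 ≤ n → pendK v n t = fspec (List.replicate n.toNat v ++ t) := by
  induction t with
  | nil =>
    intro v n hn
    by_cases hv : v = 1
    · subst hv
      rw [fspec_replicate_one n.toNat [] (by simp)]
      simp [pendK, emitRun, fspec]
      omega
    · have hne := fspec_replicate_ne v hv n.toNat []
      simp only [fspec, List.append_nil] at hne
      simp [pendK, emitRun, hv, hne]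
  | cons b t ih =>
    intro v n hn
    by_cases hb : b = v
    · subst hb
      rw [pendK, if_pos rfl, ih b (n + 1) (by omega)]
      have hsucc : (n + 1).toNat = n.toNat + 1 := by omega
      rw [hsucc, List.replicate_succ', List.append_assoc, List.singleton_append]
    · rw [pendK, if_neg hb, ih b 1 le_rfl]
      have hone : fspec (List.replicate (Int.toNat 1) b ++ t) = fspec (b :: t) := by
        norm_num
      rw [hone]
      by_cases hv : v = 1
      · subst hv
        rw [fspec_replicate_one n.toNat (b :: t) (by simpa using hb),
          emitRun, if_pos rfl, floordiv_two_toNat n (by omega)]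
      · rw [fspec_replicate_ne v hv, emitRun, if_neg hv]

-- ===== VERDICT (by name: the statement is the Claim_ definition above) =====
theorem remove_escape_py_spec : Claim_equal_remove_escape_py := by
  intro bys _
  unfold Spec_remove_escape_py remove_escape_py remove_escape_py_alt
  cases bys with
  | nil => rfl
  | cons b0 rest =>
    simp only [List.tail_cons]
    rw [loopA_eq_fspec, PySem.List.foldl_append_eq_flatMap]
    cases rest with
    | nil => rfl
    | cons b t =>
      rw [show List.foldl rleStep [] (b :: t) = List.foldl rleStep ([] ++ [(b, 1)]) t by
        simp [List.foldl, rleStep]]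
      rw [fold_rle_pend t [] b 1, pendK_eq_fspec t b 1 le_rfl]
      simp
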